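-- pv_equiv track=rewrite | github.com/mitsuo0114/competitive_programming | python/atcoder/Beginner089/C.py | solve
-- ===== SOURCE A (Python) =====
-- from itertools import combinations
--
-- def solve(N, Ss):
--     caps = {c: set() for c in 'MARCH'}
--     for s in Ss:
--         caps.setdefault(s[0], set()).add(s)
--     sum = 0
--     for d in combinations('MARCH', 3):
--         sum += len(caps[d[0]]) * len(caps[d[1]]) * len(caps[d[2]])
--     return sum
-- ===== SOURCE B (Python) =====
-- def solve(N, Ss):
--     distinct = set(Ss)
--     counts = [sum(1 for s in distinct if s[0] == c) for c in 'MARCH']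
--     e1 = e2 = e3 = 0
--     for x in counts:
--         e3 += e2 * x
--         e2 += e1 * x
--         e1 += x
--     return e3
-- ===== Notes on version B (the rewrite author's own statement) =====
-- stated objective: alternative
-- what changed: Replaces A's dict-of-sets grouping plus explicit enumeration of the 10 MARCH triples by deduplicating the name list once, counting per-MARCH-letter initials, and accumulating the 3rd elementary symmetric polynomial of the five counts with a running e1/e2/e3 DP.
import Mathlib
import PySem

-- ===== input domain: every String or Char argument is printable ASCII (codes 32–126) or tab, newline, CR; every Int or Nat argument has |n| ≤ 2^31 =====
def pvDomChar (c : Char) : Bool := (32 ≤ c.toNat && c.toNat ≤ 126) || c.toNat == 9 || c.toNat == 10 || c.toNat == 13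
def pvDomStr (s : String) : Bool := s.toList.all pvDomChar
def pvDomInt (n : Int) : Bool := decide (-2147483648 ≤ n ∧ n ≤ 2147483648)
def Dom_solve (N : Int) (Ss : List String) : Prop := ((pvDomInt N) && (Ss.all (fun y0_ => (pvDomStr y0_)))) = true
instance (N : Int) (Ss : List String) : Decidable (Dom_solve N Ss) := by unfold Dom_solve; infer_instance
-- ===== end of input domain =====

-- B replaces A's dict-of-sets plus explicit 10-triple enumeration by: dedup the names once,
-- count initials per MARCH letter, and accumulate the 3rd elementary symmetric polynomial.

-- ===== PORT A =====
-- itertools.combinations(xs, 2) / (xs, 3), transliterated structurally (same order as itertools)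
def pvPairs2 {α : Type} : List α → List (α × α)
  | [] => []
  | x :: xs => (xs.map (fun y => (x, y))) ++ pvPairs2 xs

def pvCombos3 {α : Type} : List α → List (α × α × α)
  | [] => []
  | x :: xs => ((pvPairs2 xs).map (fun p => (x, p.1, p.2))) ++ pvCombos3 xs

def solve (N : Int) (Ss : List String) : Int :=
  -- caps = {c: set() for c in 'MARCH'}
  let caps0 : PySem.Dict Char (PySem.Set String) :=
    (['M', 'A', 'R', 'C', 'H'] : List Char).foldl
      (fun d c => d.insert c PySem.Set.empty) PySem.Dict.empty
  -- for s in Ss: caps.setdefault(s[0], set()).add(s)   (setdefault + in-place add = modify with default ∅)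
  let caps : PySem.Dict Char (PySem.Set String) :=
    Ss.foldl (fun d s =>
      match PySem.Str.pyGet? s 0 with
      | some c => d.modify c PySem.Set.empty (fun t => PySem.Set.add t s)
      | none => d) caps0        -- none = IndexError on s[0]; excluded by Pre_solve
  -- for d in combinations('MARCH', 3): sum += len(caps[d[0]]) * len(caps[d[1]]) * len(caps[d[2]])
  -- caps[c] never raises KeyError here (all MARCH keys pre-inserted), so getD ∅ is exact
  (pvCombos3 (['M', 'A', 'R', 'C', 'H'] : List Char)).foldl
    (fun acc t =>
      acc + PySem.Set.len (caps.getD t.1 PySem.Set.empty)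
              * PySem.Set.len (caps.getD t.2.1 PySem.Set.empty)
              * PySem.Set.len (caps.getD t.2.2 PySem.Set.empty)) 0

-- ===== PORT B =====
def solve_alt (N : Int) (Ss : List String) : Int :=
  let distinct : PySem.Set String := PySem.Set.ofList Ss
  -- counts = [sum(1 for s in distinct if s[0] == c) for c in 'MARCH']
  let counts : List Int :=
    (['M', 'A', 'R', 'C', 'H'] : List Char).map
      (fun c => ((distinct.filter (fun s => PySem.Str.pyGet? s 0 == some c)).length : Int))
  -- e3 accumulation of the 3rd elementary symmetric polynomial
  let e : Int × Int × Int :=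
    counts.foldl (fun e x => (e.1 + x, e.2.1 + e.1 * x, e.2.2 + e.2.1 * x)) (0, 0, 0)
  e.2.2

-- ===== PRECONDITION & SPEC =====
-- Pre_ excludes lists containing an empty string, on which A raises IndexError at s[0].
def Pre_solve (N : Int) (Ss : List String) : Prop := ∀ s ∈ Ss, s ≠ ""
instance (N : Int) (Ss : List String) : Decidable (Pre_solve N Ss) := by unfold Pre_solve; infer_instance
def pvWitness_solve : Int × List String := (3, ["Maki", "Rin", "Chi"])

def Spec_solve (N : Int) (Ss : List String) (out : Int) : Prop := out = solve_alt N Ss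
instance (N : Int) (Ss : List String) (out : Int) : Decidable (Spec_solve N Ss out) := by unfold Spec_solve; infer_instance

-- ===== CLAIM (what is proved, stated in full; the proofs are below) =====
def Claim_equal_solve : Prop := ∀ (N : Int) (Ss : List String), Dom_solve N Ss → Pre_solve N Ss → Spec_solve N Ss (solve N Ss)

-- ===== LEMMAS AND PROOFS =====

-- filtering commutes with incremental set construction
lemma filter_foldl_add (p : String → Bool) (Ss : List String) (acc : PySem.Set String) :
    (Ss.foldl PySem.Set.add acc).filter p
      = (Ss.filter p).foldl PySem.Set.add (acc.filter p) := by
  induction Ss generalizing acc with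
  | nil => rfl
  | cons x xs ih =>
    simp only [List.foldl_cons, List.filter_cons]
    by_cases hp : p x
    · rw [if_pos hp, ih, List.foldl_cons]
      congr 1
      unfold PySem.Set.add
      by_cases hx : x ∈ acc
      · simp [hx, hp]
      · simp [hx, List.filter_append, hp]
    · rw [if_neg hp, ih]
      congr 1
      unfold PySem.Set.add
      by_cases hx : x ∈ acc
      · simp [hx]
      · simp [hx, List.filter_append, hp]

-- per-key characterisation of A's grouping loop
lemma getD_loop (Ss : List String) (d : PySem.Dict Char (PySem.Set String)) (c : Char) :
    (Ss.foldl (fun d s =>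
        match PySem.Str.pyGet? s 0 with
        | some c => d.modify c PySem.Set.empty (fun t => PySem.Set.add t s)
        | none => d) d).getD c PySem.Set.empty
      = (Ss.filter (fun s => PySem.Str.pyGet? s 0 == some c)).foldl
          PySem.Set.add (d.getD c PySem.Set.empty) := by
  induction Ss generalizing d with
  | nil => rfl
  | cons x xs ih =>
    simp only [List.foldl_cons, List.filter_cons]
    cases h : PySem.Str.pyGet? x 0 with
    | none =>
      rw [if_neg (by simp)]
      simp only [ih]
    | some c' =>
      by_cases hcc : c' = c
      · subst hcc
        rw [if_pos (by simp)]
        simp only [ih]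
        rw [PySem.Dict.getD_modify_self, List.foldl_cons]
      · rw [if_neg (by simpa using hcc)]
        simp only [ih]
        rw [PySem.Dict.getD_modify_of_ne _ _ _ (fun hh => hcc hh.symm)]

lemma getD_caps0 (c : Char) :
    ((['M', 'A', 'R', 'C', 'H'] : List Char).foldl
      (fun (d : PySem.Dict Char (PySem.Set String)) c => d.insert c PySem.Set.empty)
      PySem.Dict.empty).getD c PySem.Set.empty
      = (PySem.Set.empty : PySem.Set String) := by
  simp only [List.foldl_cons, List.foldl_nil, PySem.Dict.getD_insert, PySem.Dict.getD_empty]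
  split_ifs <;> rfl

-- both sides' per-letter count coincide
lemma count_eq (Ss : List String) (c : Char) :
    ((PySem.Set.ofList Ss).filter (fun s => PySem.Str.pyGet? s 0 == some c)).length
      = ((Ss.filter (fun s => PySem.Str.pyGet? s 0 == some c)).foldl
          PySem.Set.add PySem.Set.empty).length := by
  rw [PySem.Set.ofList_eq_foldl, filter_foldl_add]
  rfl

-- ===== VERDICT (by name: the statement is the Claim_ definition above) =====
theorem solve_spec : Claim_equal_solve := by
  intro N Ss _ _
  unfold Spec_solve
  have hA : ∀ c : Char,
      PySem.Set.len ((Ss.foldl (fun d s =>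
          match PySem.Str.pyGet? s 0 with
          | some c => d.modify c PySem.Set.empty (fun t => PySem.Set.add t s)
          | none => d)
        ((['M', 'A', 'R', 'C', 'H'] : List Char).foldl
          (fun d c => d.insert c PySem.Set.empty) PySem.Dict.empty)).getD c PySem.Set.empty)
        = ((((Ss.filter (fun s => PySem.Str.pyGet? s 0 == some c)).foldl
            PySem.Set.add PySem.Set.empty).length : Nat) : Int) := by
    intro c
    rw [getD_loop, getD_caps0]
    rfl
  simp only [List.foldl_cons, List.foldl_nil] at hA
  have hB : ∀ c : Char,
      ((((PySem.Set.ofList Ss).filter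
          (fun s => PySem.Str.pyGet? s 0 == some c)).length : Nat) : Int)
        = ((((Ss.filter (fun s => PySem.Str.pyGet? s 0 == some c)).foldl
            PySem.Set.add PySem.Set.empty).length : Nat) : Int) := by
    intro c
    rw [count_eq]
  simp only [solve, solve_alt, pvCombos3, pvPairs2, List.map_cons, List.map_nil,
    List.append_nil, List.nil_append, List.cons_append, List.foldl_cons, List.foldl_nil]
  rw [hA 'M', hA 'A', hA 'R', hA 'C', hA 'H', hB 'M', hB 'A', hB 'R', hB 'C', hB 'H']
  generalize (((Ss.filter (fun s => PySem.Str.pyGet? s 0 == some 'M')).foldl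
      PySem.Set.add PySem.Set.empty).length : Int) = m
  generalize (((Ss.filter (fun s => PySem.Str.pyGet? s 0 == some 'A')).foldl
      PySem.Set.add PySem.Set.empty).length : Int) = a
  generalize (((Ss.filter (fun s => PySem.Str.pyGet? s 0 == some 'R')).foldl
      PySem.Set.add PySem.Set.empty).length : Int) = r
  generalize (((Ss.filter (fun s => PySem.Str.pyGet? s 0 == some 'C')).foldl
      PySem.Set.add PySem.Set.empty).length : Int) = c
  generalize (((Ss.filter (fun s => PySem.Str.pyGet? s 0 == some 'H')).foldl
      PySem.Set.add PySem.Set.empty).length : Int) = h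
  ring
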